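-- pv_equiv track=rewrite | github.com/Orange-OpenSource/carla_croco_vcnet | carla/self_explaining_model/catalog/vcnet/library/vcnet_tabular_data_v1/split_immutable.py | cat_index_ohe
-- ===== SOURCE A (Python) =====
-- def cat_index_ohe(cat_arrays : list ,continous_cols : list ,discret_cols : list) :
--     dico = {}
--     cat_idx = len(continous_cols)
--     for i in range(len(continous_cols)) :
--         dico[continous_cols[i]] = [i,i+1]
--     for i in range (len(cat_arrays)):
--         cat_end_idx = cat_idx + len(cat_arrays[i])
--         cat_col = discret_cols[i]
--         index = [cat_idx,cat_end_idx]
--         dico[cat_col] = index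
--         cat_idx = cat_end_idx
--     return(dico)
-- ===== SOURCE B (Python) =====
-- def cat_index_ohe(cat_arrays : list, continous_cols : list, discret_cols : list):
--     # stateless closed form: each block's start is computed directly from the
--     # lengths of all preceding blocks; pairs are a pure list turned into a dict at once
--     lens = [len(a) for a in cat_arrays]
--     pairs = [(c, [i, i + 1]) for i, c in enumerate(continous_cols)]
--     for j in range(len(cat_arrays)):
--         start = len(continous_cols) + sum(lens[:j])
--         pairs.append((discret_cols[j], [start, start + lens[j]]))
--     return dict(pairs)
-- ===== Notes on version B (the rewrite author's own statement) =====
-- stated objective: alternative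
-- what changed: Replaces A's imperative dict-mutation loops with a running offset by a stateless formulation: every categorical block's start is computed by a direct closed-form sum of the preceding block lengths (no carried accumulator), the entries are built as a pure pair list and converted with one dict(pairs) call.
import Mathlib
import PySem

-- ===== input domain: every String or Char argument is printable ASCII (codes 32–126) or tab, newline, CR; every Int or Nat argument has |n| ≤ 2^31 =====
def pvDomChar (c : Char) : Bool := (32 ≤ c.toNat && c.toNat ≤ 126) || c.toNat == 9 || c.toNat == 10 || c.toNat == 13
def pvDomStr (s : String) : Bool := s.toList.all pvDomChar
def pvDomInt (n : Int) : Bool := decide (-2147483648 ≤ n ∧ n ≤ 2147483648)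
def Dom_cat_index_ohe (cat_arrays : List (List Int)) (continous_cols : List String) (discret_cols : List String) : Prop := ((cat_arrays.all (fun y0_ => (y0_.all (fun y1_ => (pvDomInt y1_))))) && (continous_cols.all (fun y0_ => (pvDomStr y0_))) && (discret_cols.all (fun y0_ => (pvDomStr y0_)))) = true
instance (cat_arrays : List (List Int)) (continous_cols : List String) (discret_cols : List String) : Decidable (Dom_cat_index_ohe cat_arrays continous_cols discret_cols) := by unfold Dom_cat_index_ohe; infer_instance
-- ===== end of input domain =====

-- B is stateless: each categorical block's start is a direct sum of the preceding block
-- lengths (no running offset), entries are a pure pair list turned into a dict at once.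

-- ===== PORT A =====
def cat_index_ohe (cat_arrays : List (List Int)) (continous_cols : List String) (discret_cols : List String) : List (String × List Int) :=
  let dico : PySem.Dict String (List Int) := PySem.Dict.empty
  let cat_idx : Int := continous_cols.length
  let dico := (PySem.List.pyRange 0 continous_cols.length 1).foldl
    (fun d i => d.insert (PySem.List.pyGetD continous_cols i "") [i, i + 1]) dico
  let st := (PySem.List.pyRange 0 cat_arrays.length 1).foldl
    (fun (st : PySem.Dict String (List Int) × Int) i =>
      let cat_end_idx := st.2 + ((PySem.List.pyGetD cat_arrays i ([] : List Int)).length : Int)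
      let cat_col := PySem.List.pyGetD discret_cols i ""
      let index := [st.2, cat_end_idx]
      (st.1.insert cat_col index, cat_end_idx)) (dico, cat_idx)
  st.1.items

-- ===== PORT B =====
def cat_index_ohe_alt (cat_arrays : List (List Int)) (continous_cols : List String) (discret_cols : List String) : List (String × List Int) :=
  let lens : List Int := cat_arrays.map (fun a => (a.length : Int))
  let pairs0 : List (String × List Int) :=
    (PySem.List.enumerate continous_cols).map (fun p => (p.2, [p.1, p.1 + 1]))
  let pairs := (PySem.List.pyRange 0 cat_arrays.length 1).foldl
    (fun ps j =>
      let start : Int := (continous_cols.length : Int) + (PySem.List.slice lens none (some j)).sum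
      ps ++ [(PySem.List.pyGetD discret_cols j "", [start, start + PySem.List.pyGetD lens j 0])])
    pairs0
  (pairs.foldl (fun (d : PySem.Dict String (List Int)) p => d.insert p.1 p.2) PySem.Dict.empty).items

-- ===== PRECONDITION & SPEC =====
-- A (and B) raise IndexError via discret_cols[i] when discret_cols is shorter than cat_arrays.
def Pre_cat_index_ohe (cat_arrays : List (List Int)) (continous_cols : List String) (discret_cols : List String) : Prop :=
  cat_arrays.length ≤ discret_cols.length
instance (cat_arrays : List (List Int)) (continous_cols : List String) (discret_cols : List String) : Decidable (Pre_cat_index_ohe cat_arrays continous_cols discret_cols) := by unfold Pre_cat_index_ohe; infer_instance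

def pvWitness_cat_index_ohe : List (List Int) × List String × List String :=
  ([[1, 2], [3]], (["a", "b"], ["c", "d"]))

def Spec_cat_index_ohe (cat_arrays : List (List Int)) (continous_cols : List String) (discret_cols : List String) (out : List (String × List Int)) : Prop := out = cat_index_ohe_alt cat_arrays continous_cols discret_cols
instance (cat_arrays : List (List Int)) (continous_cols : List String) (discret_cols : List String) (out : List (String × List Int)) : Decidable (Spec_cat_index_ohe cat_arrays continous_cols discret_cols out) := by unfold Spec_cat_index_ohe; infer_instance

-- ===== CLAIM (what is proved, stated in full; the proofs are below) =====
def Claim_equal_cat_index_ohe : Prop := ∀ (cat_arrays : List (List Int)) (continous_cols : List String) (discret_cols : List String), Dom_cat_index_ohe cat_arrays continous_cols discret_cols → Pre_cat_index_ohe cat_arrays continous_cols discret_cols → Spec_cat_index_ohe cat_arrays continous_cols discret_cols (cat_index_ohe cat_arrays continous_cols discret_cols)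

-- ===== LEMMAS AND PROOFS =====

-- A's first loop (indexing into pre ++ suf from offset |pre|) inserts exactly the
-- enumerate pairs of suf starting at |pre|.
lemma pv_loop1_eq (suf pre : List String) (d : PySem.Dict String (List Int)) :
    (PySem.List.pyRange pre.length (pre.length + suf.length) 1).foldl
      (fun d i => d.insert (PySem.List.pyGetD (pre ++ suf) i "") [i, i + 1]) d
      = (PySem.List.enumerate suf pre.length).foldl
          (fun d p => d.insert p.2 [p.1, p.1 + 1]) d := by
  induction suf generalizing pre d with
  | nil => simp [PySem.List.pyRange_one_eq_nil, PySem.List.enumerate_nil]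
  | cons c rest ih =>
    rw [PySem.List.pyRange_one_cons (by simp only [List.length_cons]; push_cast; omega)]
    rw [PySem.List.enumerate_cons]
    simp only [List.foldl_cons]
    have hget : PySem.List.pyGetD (pre ++ c :: rest) (pre.length : Int) "" = c := by
      simp [PySem.List.pyGetD_natCast, List.getD]
    rw [hget]
    have := ih (pre ++ [c]) (d.insert c [(pre.length : Int), (pre.length : Int) + 1])
    simp only [List.append_assoc, List.singleton_append, List.length_append,
      List.length_cons, List.length_nil, Nat.cast_add, Nat.cast_one] at this ⊢
    rw [show ((pre.length : Int)) + ((rest.length : Int) + 1)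
          = (pre.length : Int) + 1 + (rest.length : Int) by ring]
    exact this

-- A's second loop carries a running offset; from index k onward that offset equals
-- the closed-form start B computes (base + sum of the first k block lengths).
lemma pv_loop2_eq (ca : List (List Int)) (dc : List String) (base : Int) :
    ∀ (n k : Nat) (d : PySem.Dict String (List Int)), k + n = ca.length →
    ((PySem.List.pyRange (k : Int) (ca.length : Int) 1).foldl
      (fun (st : PySem.Dict String (List Int) × Int) i =>
        (st.1.insert (PySem.List.pyGetD dc i "")
            [st.2, st.2 + ((PySem.List.pyGetD ca i ([] : List Int)).length : Int)],
         st.2 + ((PySem.List.pyGetD ca i ([] : List Int)).length : Int)))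
      (d, base + (((ca.take k).map (fun a => (a.length : Int)))).sum)).1
    = (PySem.List.pyRange (k : Int) (ca.length : Int) 1).foldl
        (fun d j => d.insert (PySem.List.pyGetD dc j "")
          [base + (PySem.List.slice (ca.map (fun a => (a.length : Int))) none (some j)).sum,
           base + (PySem.List.slice (ca.map (fun a => (a.length : Int))) none (some j)).sum
             + PySem.List.pyGetD (ca.map (fun a => (a.length : Int))) j 0]) d := by
  intro n
  induction n with
  | zero =>
    intro k d hk
    rw [PySem.List.pyRange_one_eq_nil (by omega)]
    rfl
  | succ m ih =>
    intro k d hk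
    have hklt : k < ca.length := by omega
    rw [PySem.List.pyRange_one_cons (by push_cast; omega)]
    simp only [List.foldl_cons]
    have hslice : PySem.List.slice (ca.map (fun a => (a.length : Int))) none (some (k : Int))
        = (ca.take k).map (fun a => (a.length : Int)) := by
      rw [PySem.List.slice_to_natCast, List.map_take]
    have hgetca : PySem.List.pyGetD ca (k : Int) ([] : List Int) = ca[k] := by
      simp [PySem.List.pyGetD_natCast, List.getD, hklt]
    have hgetlen : PySem.List.pyGetD (ca.map (fun a => (a.length : Int))) (k : Int) 0
        = (ca[k].length : Int) := by
      simp [PySem.List.pyGetD_natCast, List.getD, hklt]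
    have hsum : base + (((ca.take k).map (fun a => (a.length : Int)))).sum + (ca[k].length : Int)
        = base + (((ca.take (k + 1)).map (fun a => (a.length : Int)))).sum := by
      rw [List.take_add_one]
      simp [hklt]
      ring
    have step := ih (k + 1)
      (d.insert (PySem.List.pyGetD dc (k : Int) "")
        [base + (((ca.take k).map (fun a => (a.length : Int)))).sum,
         base + (((ca.take k).map (fun a => (a.length : Int)))).sum + (ca[k].length : Int)])
      (by omega)
    simp only [hgetca, hslice, hgetlen, hsum] at *
    push_cast at step
    exact step

-- ===== VERDICT (by name: the statement is the Claim_ definition above) =====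
theorem cat_index_ohe_spec : Claim_equal_cat_index_ohe := by
  intro ca cc dc _ _
  unfold Spec_cat_index_ohe cat_index_ohe cat_index_ohe_alt
  simp only []
  congr 1
  -- B: turn the pair-list construction into pairs0 ++ map, then split the dict fold
  rw [PySem.List.foldl_append_singleton_eq_map, List.foldl_append, List.foldl_map, List.foldl_map]
  -- A: first loop = fold over enumerate pairs
  have h1 := pv_loop1_eq cc [] PySem.Dict.empty
  simp only [List.nil_append, List.length_nil, Nat.cast_zero, zero_add] at h1
  rw [h1]
  -- A: second loop = fold with the closed-form starts
  have h2 := pv_loop2_eq ca dc (cc.length : Int) ca.length 0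
    ((PySem.List.enumerate cc 0).foldl (fun d p => d.insert p.2 [p.1, p.1 + 1]) PySem.Dict.empty)
    (by omega)
  simp only [Nat.cast_zero, List.take_zero, List.map_nil, List.sum_nil, add_zero] at h2
  exact h2
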